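-- pv_equiv track=rewrite | github.com/Jazende/ProjectEuler | solved/problem_108.py | nr_solutions_above
-- ===== SOURCE A (Python) =====
-- def nr_solutions_above(target=1000):
--     n = 0
--     while True:
--         count = 0
--         max_x = n * 2 + 1
--         for x in range(n+1, max_x):
--             if (n*x) % (x-n) == 0:
--                 count += 1
--             if count >= target*2:
--                 break
--         if count >= target:
--             break
--         n += 1
--     return n
-- ===== SOURCE B (Python) =====
-- def solutions(n):
--     # number of x in (n, 2n] with (n*x) % (x-n) == 0, i.e. divisors of n^2 that are <= n,
--     # computed as (tau(n^2)+1)//2 from the prime factorization of n.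
--     if n == 0:
--         return 0
--     tau = 1
--     m = n
--     p = 2
--     while p * p <= m:
--         if m % p == 0:
--             e = 0
--             while m % p == 0:
--                 m //= p
--                 e += 1
--             tau *= 2 * e + 1
--         p += 1
--     if m > 1:
--         tau *= 3
--     return (tau + 1) // 2
--
--
-- def nr_solutions_above(target=1000):
--     n = 0
--     while True:
--         if solutions(n) >= target:
--             return n
--         n += 1
-- ===== Notes on version B (the rewrite author's own statement) =====
-- stated objective: faster
-- what changed: A counts solutions of 1/x+1/y=1/n by trying every x in (n,2n] for each candidate n (O(answer^2) divisions); B computes the same count as (tau(n^2)+1)/2 from the prime factorization of n obtained by trial division up to sqrt(n), using that solutions with x<=y correspond to divisors of n^2 that are at most n.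
import Mathlib
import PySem

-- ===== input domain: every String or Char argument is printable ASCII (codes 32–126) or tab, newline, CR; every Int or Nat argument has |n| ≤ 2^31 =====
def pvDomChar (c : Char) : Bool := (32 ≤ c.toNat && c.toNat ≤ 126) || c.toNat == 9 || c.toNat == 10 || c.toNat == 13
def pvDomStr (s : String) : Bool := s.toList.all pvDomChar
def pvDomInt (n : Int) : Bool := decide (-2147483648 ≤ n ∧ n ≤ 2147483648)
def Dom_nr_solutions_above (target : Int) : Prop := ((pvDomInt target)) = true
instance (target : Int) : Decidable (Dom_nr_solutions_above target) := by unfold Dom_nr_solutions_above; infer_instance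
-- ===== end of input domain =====

-- B replaces A's O(answer^2) brute-force solution counting by counting divisors of n^2
-- from the prime factorization of n (trial division to sqrt n); measurably faster.

-- ===== PORT A =====
-- inner 'for x in range(n+1, max_x)' loop with its break, over the remaining range
def pvInnerA (target n : Int) : List Int → Int → Int
  | [], count => count
  | x :: xs, count =>
    let count' := if PySem.Int.mod (n * x) (x - n) == 0 then count + 1 else count
    if count' ≥ target * 2 then count' else pvInnerA target n xs count'

-- outer 'while True' search; fuel only makes it total (the answer is reached long before
-- 2^target.toNat iterations, since n = 2^t already has t+1 solutions)
def pvOuterA (target : Int) : Nat → Int → Int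
  | 0, n => n
  | fuel + 1, n =>
    let count := pvInnerA target n (PySem.List.pyRange (n + 1) (n * 2 + 1) 1) 0
    if count ≥ target then n else pvOuterA target fuel (n + 1)

def nr_solutions_above (target : Int) : Int := pvOuterA target (2 ^ target.toNat + 1) 0

-- ===== PORT B =====
-- 'while m % p == 0: m //= p; e += 1', made total by a fuel argument (m.toNat at the call
-- site, enough since m at least halves on every division)
def pvExtract (fuel : Nat) (m p e : Int) : Int × Int :=
  match fuel with
  | 0 => (m, e)
  | fuel + 1 =>
    if PySem.Int.mod m p == 0 then pvExtract fuel (PySem.Int.floordiv m p) p (e + 1)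
    else (m, e)

-- 'while p * p <= m' trial-division loop, made total by a fuel argument (m.toNat + 1 at
-- the call site, enough since m - p strictly decreases every iteration)
def pvFactLoop (fuel : Nat) (m p tau : Int) : Int × Int :=
  match fuel with
  | 0 => (m, tau)
  | fuel + 1 =>
    if p * p ≤ m then
      if PySem.Int.mod m p == 0 then
        let r := pvExtract m.toNat m p 0
        pvFactLoop fuel r.1 (p + 1) (tau * (2 * r.2 + 1))
      else pvFactLoop fuel m (p + 1) tau
    else (m, tau)

def pvSolutions (n : Int) : Int :=
  if n == 0 then 0
  else
    let r := pvFactLoop (n.toNat + 1) n 2 1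
    let tau := if r.1 > 1 then r.2 * 3 else r.2
    PySem.Int.floordiv (tau + 1) 2

def pvOuterB (target : Int) : Nat → Int → Int
  | 0, n => n
  | fuel + 1, n => if pvSolutions n ≥ target then n else pvOuterB target fuel (n + 1)

def nr_solutions_above_alt (target : Int) : Int := pvOuterB target (2 ^ target.toNat + 1) 0

-- ===== PRECONDITION & SPEC =====
def Spec_nr_solutions_above (target : Int) (out : Int) : Prop := out = nr_solutions_above_alt target
instance (target : Int) (out : Int) : Decidable (Spec_nr_solutions_above target out) := by unfold Spec_nr_solutions_above; infer_instance

-- ===== CLAIM (what is proved, stated in full; the proofs are below) =====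
def Claim_equal_nr_solutions_above : Prop := ∀ (target : Int), Dom_nr_solutions_above target → Spec_nr_solutions_above target (nr_solutions_above target)

-- ===== LEMMAS AND PROOFS =====

-- spec-level count: divisors of n^2 that are ≤ n (= solutions of 1/x + 1/y = 1/n with x ≤ y)
def pvK (n : Nat) : Nat := ((n ^ 2).divisors.filter (fun d => d ≤ n)).card

theorem pvExtract_spec (p : Int) (fuel : Nat) : ∀ (m e : Int), 1 ≤ m → 2 ≤ p → m.toNat ≤ fuel →
    ∃ k : Nat, (pvExtract fuel m p e).2 = e + k ∧ (pvExtract fuel m p e).1 * p ^ k = m ∧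
      ¬ (p ∣ (pvExtract fuel m p e).1) ∧ 1 ≤ (pvExtract fuel m p e).1 := by
  induction fuel with
  | zero => intro m e hm hp hf; omega
  | succ fuel ih =>
    intro m e hm hp hf
    by_cases hmod : PySem.Int.mod m p = 0
    · have hdvd : p ∣ m := (PySem.Int.mod_eq_zero_iff_dvd m p).1 hmod
      have hple : p ≤ m := Int.le_of_dvd (by omega) hdvd
      have h1 : 1 ≤ PySem.Int.floordiv m p := by
        rw [PySem.Int.floordiv_eq_ediv_of_pos (by omega), Int.le_ediv_iff_mul_le (by omega)]
        omega
      have h2 : PySem.Int.floordiv m p < m := by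
        rw [PySem.Int.floordiv_eq_ediv_of_pos (by omega)]
        rw [Int.ediv_lt_iff_lt_mul (by omega)]; nlinarith
      have hstep : pvExtract (fuel + 1) m p e
          = pvExtract fuel (PySem.Int.floordiv m p) p (e + 1) := by
        simp [pvExtract, hmod]
      obtain ⟨k, hk2, hk1, hknd, hkpos⟩ := ih (PySem.Int.floordiv m p) (e + 1) h1 hp (by omega)
      rw [hstep]
      refine ⟨k + 1, by rw [hk2]; push_cast; ring, ?_, hknd, hkpos⟩
      have hfl : PySem.Int.floordiv m p * p = m := by
        rw [PySem.Int.floordiv_eq_ediv_of_pos (by omega)]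
        exact Int.ediv_mul_cancel hdvd
      calc (pvExtract fuel (PySem.Int.floordiv m p) p (e + 1)).1 * p ^ (k + 1)
          = ((pvExtract fuel (PySem.Int.floordiv m p) p (e + 1)).1 * p ^ k) * p := by ring
        _ = PySem.Int.floordiv m p * p := by rw [hk1]
        _ = m := hfl
    · have hstep : pvExtract (fuel + 1) m p e = (m, e) := by
        simp [pvExtract, hmod]
      rw [hstep]
      refine ⟨0, by simp, by simp, ?_, hm⟩
      intro hdvd
      exact hmod ((PySem.Int.mod_eq_zero_iff_dvd m p).2 hdvd)

-- primality of the trial divisor p when it divides m and nothing smaller does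
theorem pvPrimeDiv (p m : Int) (hp : 2 ≤ p) (hdvd : p ∣ m) (hm : 1 ≤ m)
    (hsmall : ∀ q : Int, 2 ≤ q → q < p → ¬ q ∣ m) : Nat.Prime p.toNat := by
  rw [Nat.prime_def_lt]
  refine ⟨by omega, fun d hd hdp => ?_⟩
  by_contra hne
  have hd0 : d ≠ 0 := by rintro rfl; simp at hdp; omega
  have hd2 : 2 ≤ d := by omega
  have hdi : (d : Int) ∣ p := by
    have : (d : Int) ∣ (p.toNat : Int) := Int.natCast_dvd_natCast.2 hdp
    rwa [Int.toNat_of_nonneg (by omega)] at this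
  exact hsmall d (by omega) (by omega) (hdi.trans hdvd)

-- if m has no prime factor below p and m < p^2 then m is prime
theorem pvPrimeRem (m p : Int) (hm : 2 ≤ m) (hp : 2 ≤ p) (hlt : m < p * p)
    (hsmall : ∀ q : Int, 2 ≤ q → q < p → ¬ q ∣ m) : Nat.Prime m.toNat := by
  by_contra hnp
  have h0 : 0 < m.toNat := by omega
  have hsq := Nat.minFac_sq_le_self h0 hnp
  have hf2 : 2 ≤ m.toNat.minFac := (Nat.minFac_prime (by omega)).two_le
  have hfd : (m.toNat.minFac : Int) ∣ m := by
    have : (m.toNat.minFac : Int) ∣ (m.toNat : Int) := Int.natCast_dvd_natCast.2 (Nat.minFac_dvd _)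
    rwa [Int.toNat_of_nonneg (by omega)] at this
  have hge : p ≤ (m.toNat.minFac : Int) := by
    by_contra hlt'
    exact hsmall _ (by exact_mod_cast hf2) (by omega) hfd
  have : p * p ≤ (m.toNat.minFac : Int) * m.toNat.minFac :=
    mul_le_mul hge hge (by omega) (by omega)
  have hsq' : (m.toNat.minFac : Int) * m.toNat.minFac ≤ m := by
    have : (m.toNat.minFac * m.toNat.minFac : Nat) ≤ m.toNat := by
      have := hsq; rwa [pow_two] at this
    calc ((m.toNat.minFac : Int)) * m.toNat.minFac = ((m.toNat.minFac * m.toNat.minFac : Nat) : Int) := by push_cast; ring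
      _ ≤ (m.toNat : Int) := by exact_mod_cast this
      _ = m := Int.toNat_of_nonneg (by omega)
  omega

theorem pvCardPP (p k : Nat) (pp : Nat.Prime p) : ((p ^ k).divisors.card) = k + 1 := by
  rw [Nat.divisors_prime_pow pp]
  simp

-- multiplicativity step: tau((a * p^k)^2) = (2k+1) * tau(a^2)
theorem pvTauMul (a p k : Nat) (pp : Nat.Prime p) (hnd : ¬ p ∣ a) (ha : 1 ≤ a) :
    ((a * p ^ k) ^ 2).divisors.card = (2 * k + 1) * (a ^ 2).divisors.card := by
  have hco : (Nat.Coprime (p ^ (2 * k)) (a ^ 2)) :=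
    Nat.Coprime.pow _ _ ((Nat.Prime.coprime_iff_not_dvd pp).2 hnd)
  have he : (a * p ^ k) ^ 2 = p ^ (2 * k) * a ^ 2 := by ring
  rw [he, hco.card_divisors_mul, pvCardPP p (2 * k) pp]

theorem pvFactLoop_spec (fuel : Nat) : ∀ (m p tau : Int), 1 ≤ m → 2 ≤ p →
    (m - p).toNat < fuel →
    (∀ q : Int, 2 ≤ q → q < p → ¬ q ∣ m) →
    (pvFactLoop fuel m p tau).2 * ((((pvFactLoop fuel m p tau).1.toNat ^ 2).divisors.card : Int))
        = tau * ((m.toNat ^ 2).divisors.card : Int)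
      ∧ 1 ≤ (pvFactLoop fuel m p tau).1
      ∧ (1 < (pvFactLoop fuel m p tau).1 → Nat.Prime (pvFactLoop fuel m p tau).1.toNat) := by
  induction fuel with
  | zero => intro m p tau hm hp hf hsmall; omega
  | succ fuel ih =>
    intro m p tau hm hp hf hsmall
    by_cases hg : p * p ≤ m
    · have hm2 : p + 2 ≤ m := by nlinarith
      by_cases hmod : PySem.Int.mod m p = 0
      · have hdvd : p ∣ m := (PySem.Int.mod_eq_zero_iff_dvd m p).1 hmod
        obtain ⟨k, hk2, hk1, hknd, hkpos⟩ := pvExtract_spec p m.toNat m 0 hm hp le_rfl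
        set r := pvExtract m.toNat m p 0 with hr
        have hpp : Nat.Prime p.toNat := pvPrimeDiv p m hp hdvd hm hsmall
        have heq : pvFactLoop (fuel + 1) m p tau
            = pvFactLoop fuel r.1 (p + 1)
                (tau * (2 * r.2 + 1)) := by
          simp only [pvFactLoop, if_pos hg]
          rw [if_pos (by simp [hmod])]
        have hkne : k ≠ 0 := by
          intro h0
          rw [h0, pow_zero, mul_one] at hk1
          exact hknd (hk1 ▸ hdvd)
        have hlt : r.1 < m := by
          have hpk : p ≤ p ^ k := le_self_pow₀ (by omega) hkne
          nlinarith [hk1]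
        have hnat : m.toNat = r.1.toNat * p.toNat ^ k := by
          have h1 : ((r.1.toNat * p.toNat ^ k : Nat) : Int)
              = (m.toNat : Int) := by
            push_cast
            rw [Int.toNat_of_nonneg (by omega : (0:Int) ≤ r.1),
                Int.toNat_of_nonneg (by omega : (0:Int) ≤ p),
                Int.toNat_of_nonneg (by omega : (0:Int) ≤ m)]
            exact hk1
          exact_mod_cast h1.symm
        have hndn : ¬ p.toNat ∣ r.1.toNat := by
          intro hdn
          apply hknd
          have h2 : (p.toNat : Int) ∣ (r.1.toNat : Int) :=
            Int.natCast_dvd_natCast.2 hdn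
          rwa [Int.toNat_of_nonneg (by omega : (0:Int) ≤ p),
               Int.toNat_of_nonneg (by omega : (0:Int) ≤ r.1)] at h2
        have htau : (m.toNat ^ 2).divisors.card
            = (2 * k + 1) * ((r.1.toNat ^ 2).divisors.card) := by
          rw [hnat]; exact pvTauMul _ _ k hpp hndn (by omega)
        have hsmall' : ∀ q : Int, 2 ≤ q → q < p + 1 → ¬ q ∣ r.1 := by
          intro q h2q hqp hqd
          by_cases hq : q = p
          · exact hknd (hq ▸ hqd)
          · have hr1d : r.1 ∣ m := ⟨p ^ k, hk1.symm⟩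
            exact hsmall q h2q (by omega) (hqd.trans hr1d)
        obtain ⟨ih1, ih2, ih3⟩ := ih r.1 (p + 1)
          (tau * (2 * r.2 + 1)) hkpos (by omega) (by omega) hsmall'
        rw [heq]
        refine ⟨?_, ih2, ih3⟩
        rw [ih1, htau, hk2]
        push_cast
        ring
      · have heq : pvFactLoop (fuel + 1) m p tau = pvFactLoop fuel m (p + 1) tau := by
          simp only [pvFactLoop, if_pos hg]
          rw [if_neg (by simp [hmod])]
        have hsmall' : ∀ q : Int, 2 ≤ q → q < p + 1 → ¬ q ∣ m := by
          intro q h2q hqp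
          by_cases hq : q = p
          · exact hq ▸ fun hd => hmod ((PySem.Int.mod_eq_zero_iff_dvd m p).2 hd)
          · exact hsmall q h2q (by omega)
        rw [heq]
        exact ih m (p + 1) tau hm (by omega) (by omega) hsmall'
    · have heq : pvFactLoop (fuel + 1) m p tau = (m, tau) := by
        simp only [pvFactLoop, if_neg hg]
      rw [heq]
      refine ⟨rfl, hm, fun h1 => ?_⟩
      exact pvPrimeRem m p (by omega) hp (by omega) hsmall

-- the divisors of n^2 pair off d ↔ n^2/d around the square root n
theorem pvPair (n : Nat) (hn : 1 ≤ n) : (n ^ 2).divisors.card + 1 = 2 * pvK n := by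
  have hs0 : n ^ 2 ≠ 0 := by positivity
  have hnmem : n ∈ (n ^ 2).divisors := Nat.mem_divisors.2 ⟨⟨n, (pow_two n)⟩, hs0⟩
  have key : ((n ^ 2).divisors.filter (fun d => d < n)).card
      = ((n ^ 2).divisors.filter (fun d => n < d)).card := by
    rw [Finset.card_filter, Finset.card_filter]
    calc ∑ d ∈ (n ^ 2).divisors, (if d < n then 1 else 0)
        = ∑ d ∈ (n ^ 2).divisors, (if n < n ^ 2 / d then 1 else 0) := by
          refine Finset.sum_congr rfl (fun d hd => ?_)
          obtain ⟨hdvd, -⟩ := Nat.mem_divisors.1 hd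
          have hd0 : 0 < d := Nat.pos_of_dvd_of_pos hdvd (by positivity)
          have hc : n ^ 2 / d * d = n ^ 2 := Nat.div_mul_cancel hdvd
          have hiff : d < n ↔ n < n ^ 2 / d := by
            constructor
            · intro h
              by_contra hle
              push_neg at hle
              nlinarith [hc]
            · intro h
              by_contra hle
              push_neg at hle
              nlinarith [hc]
          simp only [hiff]
      _ = ∑ d ∈ (n ^ 2).divisors, (if n < d then 1 else 0) :=
          Nat.sum_div_divisors (n ^ 2) (fun d => if n < d then 1 else 0)
  have hsplit : (n ^ 2).divisors.filter (fun d => d ≤ n)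
      = insert n ((n ^ 2).divisors.filter (fun d => d < n)) := by
    ext d
    simp only [Finset.mem_filter, Finset.mem_insert]
    constructor
    · rintro ⟨hd, hle⟩
      rcases eq_or_lt_of_le hle with h | h
      · exact Or.inl h
      · exact Or.inr ⟨hd, h⟩
    · rintro (rfl | ⟨hd, hlt⟩)
      · exact ⟨hnmem, le_rfl⟩
      · exact ⟨hd, le_of_lt hlt⟩
  have hK : pvK n = ((n ^ 2).divisors.filter (fun d => d < n)).card + 1 := by
    rw [pvK, hsplit, Finset.card_insert_of_notMem (by simp)]
  have htotal : ((n ^ 2).divisors.filter (fun d => d ≤ n)).card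
      + ((n ^ 2).divisors.filter (fun d => n < d)).card = (n ^ 2).divisors.card := by
    have hfc : ((n ^ 2).divisors.filter (fun d => n < d))
        = ((n ^ 2).divisors.filter (fun d => ¬ d ≤ n)) :=
      Finset.filter_congr (fun d _ => by omega)
    rw [hfc, Finset.card_filter_add_card_filter_not (s := (n ^ 2).divisors) (fun d => d ≤ n)]
  have hK' : pvK n = ((n ^ 2).divisors.filter (fun d => d ≤ n)).card := rfl
  omega

theorem pvSolutions_eq (n : Int) (hn : 0 ≤ n) : pvSolutions n = (pvK n.toNat : Int) := by
  by_cases h0 : n = 0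
  · subst h0
    simp [pvSolutions, pvK, Nat.divisors_zero]
  · have hn1 : 1 ≤ n := by omega
    have hspec := pvFactLoop_spec (n.toNat + 1) n 2 1 hn1 le_rfl (by omega) (fun q hq hlt => by omega)
    obtain ⟨h1, h2, h3⟩ := hspec
    have hbeq : (n == (0:Int)) = false := by simp [h0]
    have hrw : pvSolutions n
        = PySem.Int.floordiv ((if (pvFactLoop (n.toNat + 1) n 2 1).1 > 1 then (pvFactLoop (n.toNat + 1) n 2 1).2 * 3
            else (pvFactLoop (n.toNat + 1) n 2 1).2) + 1) 2 := by
      rw [pvSolutions]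
      simp [hbeq]
    have htau : (if (pvFactLoop (n.toNat + 1) n 2 1).1 > 1 then (pvFactLoop (n.toNat + 1) n 2 1).2 * 3
        else (pvFactLoop (n.toNat + 1) n 2 1).2) = ((n.toNat ^ 2).divisors.card : Int) := by
      by_cases hgt : (pvFactLoop (n.toNat + 1) n 2 1).1 > 1
      · rw [if_pos hgt]
        have hpp := h3 hgt
        have hc3 : (((pvFactLoop (n.toNat + 1) n 2 1).1.toNat ^ 2).divisors.card : Nat) = 3 := by
          rw [pvCardPP _ 2 hpp]
        rw [hc3] at h1
        omega
      · have hone : (pvFactLoop (n.toNat + 1) n 2 1).1 = 1 := by omega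
        rw [if_neg hgt]
        rw [hone] at h1
        simpa using h1
    rw [hrw, htau]
    have hpair := pvPair n.toNat (by omega)
    have : ((n.toNat ^ 2).divisors.card : Int) + 1 = ((2 * pvK n.toNat : Nat) : Int) := by
      exact_mod_cast congrArg (Nat.cast : Nat → Int) hpair
    rw [this, show (2:Int) = ((2:Nat):Int) from rfl, PySem.Int.floordiv_natCast]
    simp

def pvPredB (n : Int) : Int → Bool := fun x => PySem.Int.mod (n * x) (x - n) == 0

theorem pvInnerA_ge (t n : Int) (xs : List Int) (c : Int) : c ≤ pvInnerA t n xs c := by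
  induction xs generalizing c with
  | nil => simp [pvInnerA]
  | cons x xs ih =>
    simp only [pvInnerA]
    split_ifs with h1 h2 h3
    · omega
    · exact le_trans (by omega : c ≤ c + 1) (ih (c + 1))
    · omega
    · exact ih c

theorem pvInnerA_le (t n : Int) (xs : List Int) (c : Int) :
    pvInnerA t n xs c ≤ c + (xs.countP (pvPredB n) : Int) := by
  induction xs generalizing c with
  | nil => simp [pvInnerA]
  | cons x xs ih =>
    simp only [pvInnerA, List.countP_cons, pvPredB]
    split_ifs with h1 h2 h3
    · push_cast; omega
    · have := ih (c + 1); push_cast at this ⊢; omega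
    · push_cast; omega
    · have := ih c; push_cast at this ⊢; omega

theorem pvInnerA_cases (t n : Int) (xs : List Int) (c : Int) :
    pvInnerA t n xs c = c + (xs.countP (pvPredB n) : Int) ∨ t * 2 ≤ pvInnerA t n xs c := by
  induction xs generalizing c with
  | nil => left; simp [pvInnerA]
  | cons x xs ih =>
    simp only [pvInnerA, List.countP_cons, pvPredB]
    split_ifs with h1 h2 h3
    · right; omega
    · rcases ih (c + 1) with h | h
      · left; rw [h]; push_cast; ring
      · right; exact h
    · right; omega
    · rcases ih c with h | h
      · left; rw [h]; push_cast; ring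
      · right; exact h

theorem pvCountRange (N : Nat) (p : Nat → Bool) :
    (List.range N).countP p = ((Finset.range N).filter (fun i => p i = true)).card := by
  induction N with
  | zero => simp
  | succ N ih =>
    rw [List.range_succ, List.countP_append, Finset.range_add_one, Finset.filter_insert]
    by_cases hp : p N = true
    · rw [if_pos hp, Finset.card_insert_of_notMem (by simp), ih]
      simp [hp]
    · rw [if_neg hp, ih]
      simp [hp]

theorem pvCardShift (n : Nat) (hn : 1 ≤ n) :
    ((Finset.range n).filter (fun i => (i + 1) ∣ n ^ 2)).card = pvK n := by
  rw [pvK]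
  apply Finset.card_bij (fun i _ => i + 1)
  · intro i hi
    simp only [Finset.mem_filter, Finset.mem_range] at hi ⊢
    exact ⟨Nat.mem_divisors.2 ⟨hi.2, by positivity⟩, by omega⟩
  · intro a ha b hb h
    omega
  · intro d hd
    simp only [Finset.mem_filter] at hd
    obtain ⟨hmem, hle⟩ := hd
    obtain ⟨hdvd, hne⟩ := Nat.mem_divisors.1 hmem
    have hd0 : 0 < d := Nat.pos_of_dvd_of_pos hdvd (by positivity)
    refine ⟨d - 1, ?_, by omega⟩
    simp only [Finset.mem_filter, Finset.mem_range]
    refine ⟨by omega, ?_⟩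
    rw [Nat.sub_add_cancel hd0]
    exact hdvd

theorem pvCountP_eq (n : Int) (hn : 0 ≤ n) :
    ((PySem.List.pyRange (n + 1) (n * 2 + 1) 1).countP (pvPredB n)) = pvK n.toNat := by
  rw [PySem.List.pyRange_one, List.countP_map]
  have hN : (n * 2 + 1 - (n + 1)).toNat = n.toNat := by omega
  rw [hN]
  have hcongr : ∀ k ∈ List.range n.toNat,
      ((pvPredB n) ∘ (fun k : Nat => (n + 1) + (k : Int))) k
        = decide ((k + 1) ∣ n.toNat ^ 2) := by
    intro k _
    have hx : (n + 1 + (k : Int)) - n = (k : Int) + 1 := by ring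
    have hsplit : n * (n + 1 + (k : Int)) = n * ((k : Int) + 1) + n * n := by ring
    have hiff : (PySem.Int.mod (n * (n + 1 + (k : Int))) ((n + 1 + (k : Int)) - n) = 0)
        ↔ ((k + 1) ∣ n.toNat ^ 2) := by
      rw [hx, PySem.Int.mod_eq_zero_iff_dvd, hsplit,
          dvd_add_right ⟨n, mul_comm n ((k:Int)+1)⟩]
      have h1 : n * n = ((n.toNat ^ 2 : Nat) : Int) := by
        have h := Int.toNat_of_nonneg hn
        push_cast
        rw [h]; ring
      have h2 : ((k : Int) + 1) = (((k + 1 : Nat)) : Int) := by push_cast; ring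
      rw [h1, h2, Int.natCast_dvd_natCast]
    simp only [Function.comp, pvPredB]
    by_cases h : (k + 1) ∣ n.toNat ^ 2
    · simp [hiff.2 h, h]
    · have : ¬ (PySem.Int.mod (n * (n + 1 + (k : Int))) ((n + 1 + (k : Int)) - n) = 0) :=
        fun hc => h (hiff.1 hc)
      simp [h, this]
  rw [List.countP_congr (fun x hx => by rw [hcongr x hx]), pvCountRange]
  by_cases h0 : n.toNat = 0
  · simp [h0, pvK, Nat.divisors_zero]
  · rw [← pvCardShift n.toNat (by omega)]
    congr 1
    exact Finset.filter_congr (fun i _ => by simp)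

theorem pvInnerA_iff (t n : Int) (hn : 0 ≤ n) :
    (pvInnerA t n (PySem.List.pyRange (n + 1) (n * 2 + 1) 1) 0 ≥ t) ↔ ((pvK n.toNat : Int) ≥ t) := by
  have hle := pvInnerA_le t n (PySem.List.pyRange (n + 1) (n * 2 + 1) 1) 0
  have hge := pvInnerA_ge t n (PySem.List.pyRange (n + 1) (n * 2 + 1) 1) 0
  have hcases := pvInnerA_cases t n (PySem.List.pyRange (n + 1) (n * 2 + 1) 1) 0
  rw [pvCountP_eq n hn] at hle hcases
  rcases hcases with h | h <;> omega

theorem pvOuter_eq (fuel : Nat) (t n : Int) (hn : 0 ≤ n) :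
    pvOuterA t fuel n = pvOuterB t fuel n := by
  induction fuel generalizing n with
  | zero => rfl
  | succ fuel ih =>
    have hc : (pvInnerA t n (PySem.List.pyRange (n + 1) (n * 2 + 1) 1) 0 ≥ t) ↔ (pvSolutions n ≥ t) := by
      rw [pvSolutions_eq n hn]; exact pvInnerA_iff t n hn
    simp only [pvOuterA, pvOuterB]
    by_cases h : pvSolutions n ≥ t
    · rw [if_pos (hc.mpr h), if_pos h]
    · rw [if_neg (fun hh => h (hc.mp hh)), if_neg h]
      exact ih (n + 1) (by omega)

-- ===== VERDICT (by name: the statement is the Claim_ definition above) =====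
theorem nr_solutions_above_spec : Claim_equal_nr_solutions_above := by
  intro target _
  unfold Spec_nr_solutions_above nr_solutions_above nr_solutions_above_alt
  exact pvOuter_eq _ target 0 le_rfl
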